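-- pv_equiv track=rewrite | github.com/KesslerMentele/launch_school_python_exercises | Exercises/PY110_PY119_Small_Problems/Medium_2/next_featured_number_higher_than_a_given_value.py | next_featured
-- ===== SOURCE A (Python) =====
-- def next_featured(floor:int)->int | str:
--
--     def is_valid(num:int)->bool:
--         if num % 2 == 0 or num % 7 != 0:
--             return False
--         if len(str(num)) != len(set(str(num))):
--             return False
--         return True
--
--     while True:
--         if is_valid(floor + 1):
--             return floor + 1
--         else:
--             floor += 1
-- ===== SOURCE B (Python) =====
-- def next_featured(floor: int) -> int | str:
--     # Jump directly to the least n > floor with n % 14 == 7 (odd multiple of 7),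
--     # then step by 14, testing only the distinct-digit condition.
--     n = floor + 1 + (7 - (floor + 1)) % 14
--     while True:
--         s = str(n)
--         if len(set(s)) == len(s):
--             return n
--         n += 14
-- ===== Notes on version B (the rewrite author's own statement) =====
-- stated objective: alternative
-- what changed: Instead of testing every successive integer for parity, divisibility and distinct digits, B computes the least qualifying residue above the floor by modular arithmetic and steps by the combined period, performing only the distinct-digit test on each candidate.
import Mathlib
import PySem

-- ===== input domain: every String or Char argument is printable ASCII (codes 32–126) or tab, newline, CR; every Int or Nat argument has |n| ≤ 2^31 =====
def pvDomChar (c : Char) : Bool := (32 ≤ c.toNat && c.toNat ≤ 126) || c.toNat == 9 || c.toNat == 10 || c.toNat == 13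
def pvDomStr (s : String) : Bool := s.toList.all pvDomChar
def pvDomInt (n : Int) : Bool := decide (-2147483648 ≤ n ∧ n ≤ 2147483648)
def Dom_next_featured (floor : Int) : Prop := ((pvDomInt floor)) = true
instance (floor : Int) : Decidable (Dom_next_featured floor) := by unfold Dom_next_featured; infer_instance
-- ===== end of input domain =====

-- B jumps straight to the least qualifying residue above the floor and steps by the combined
-- period, testing only the distinct-digit condition; both loops are totalized with fuel that
-- provably suffices on the whole domain.


-- ===== PORT A =====
-- is_valid of A: parity/mod-7 test, then distinct-character test on str(num)
def pvIsValid (num : Int) : Bool :=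
  if PySem.Int.mod num 2 = 0 || PySem.Int.mod num 7 ≠ 0 then false
  else if (PySem.Int.toChars num).length ≠ (PySem.Set.ofList (PySem.Int.toChars num)).length then false
  else true

-- A's 'while True' loop, totalized with fuel (returns 0 on exhaustion; the fuel provably
-- suffices for every floor in Dom_next_featured, see the proofs below)
def pvLoopA (floor : Int) : Nat → Int
  | 0 => 0
  | f + 1 => if pvIsValid (floor + 1) then floor + 1 else pvLoopA (floor + 1) f

def next_featured (floor : Int) : Int := pvLoopA floor 8589934592

-- ===== PORT B =====
-- B's loop body: only the distinct-character test on str(n)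
def pvDistinct (n : Int) : Bool :=
  (PySem.Set.ofList (PySem.Int.toChars n)).length == (PySem.Int.toChars n).length

def pvLoopB (n : Int) : Nat → Int
  | 0 => 0
  | f + 1 => if pvDistinct n then n else pvLoopB (n + 14) f

def next_featured_alt (floor : Int) : Int :=
  pvLoopB (floor + 1 + PySem.Int.mod (7 - (floor + 1)) 14) 1073741824

-- ===== PRECONDITION & SPEC =====
def Spec_next_featured (floor : Int) (out : Int) : Prop := out = next_featured_alt floor
instance (floor : Int) (out : Int) : Decidable (Spec_next_featured floor out) := by unfold Spec_next_featured; infer_instance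

-- ===== CLAIM (what is proved, stated in full; the proofs are below) =====
def Claim_equal_next_featured : Prop := ∀ (floor : Int), Dom_next_featured floor → Spec_next_featured floor (next_featured floor)

-- ===== LEMMAS AND PROOFS =====

-- A's validity test is: n ≡ 7 (mod 14) and distinct characters of str(n)
theorem pvIsValid_iff (n : Int) :
    pvIsValid n = true ↔ (n % 14 = 7 ∧ pvDistinct n = true) := by
  have h2 := PySem.Int.mod_eq_emod_of_pos (a := n) (b := 2) (by norm_num)
  have h7 := PySem.Int.mod_eq_emod_of_pos (a := n) (b := 7) (by norm_num)
  simp only [pvIsValid, pvDistinct, h2, h7]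
  by_cases hd : (PySem.Int.toChars n).length = (PySem.Set.ofList (PySem.Int.toChars n)).length
  · simp [hd]; omega
  · simp [hd]; intro h; exact fun h' => hd h'.symm

theorem pvLoopA_spec (F : Nat) (fl m : Int) (hv : pvIsValid m = true)
    (hlt : fl < m) (hle : m ≤ fl + F)
    (hmin : ∀ k, fl < k → k < m → pvIsValid k = false) :
    pvLoopA fl F = m := by
  induction F generalizing fl with
  | zero => omega
  | succ f ih =>
    cases h : pvIsValid (fl + 1) with
    | true =>
      have : m = fl + 1 := by
        by_contra hne
        have : fl + 1 < m := by omega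
        have := hmin (fl + 1) (by omega) this
        simp [h] at this
      simp [pvLoopA, h, this]
    | false =>
      have hne : m ≠ fl + 1 := fun he => by rw [he] at hv; simp [h] at hv
      simp only [pvLoopA, h, Bool.false_eq_true, if_false]
      exact ih (fl + 1) (by omega) (by push_cast at hle ⊢; omega)
        (fun k hk1 hk2 => hmin k (by omega) hk2)

theorem pvLoopB_spec (F : Nat) (s m : Int) (hv : pvDistinct m = true)
    (hle : s ≤ m) (hdvd : (14 : Int) ∣ (m - s)) (hF : m + 1 ≤ s + 14 * F)
    (hmin : ∀ k, s ≤ k → k < m → (14 : Int) ∣ (k - s) → pvDistinct k = false) :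
    pvLoopB s F = m := by
  induction F generalizing s with
  | zero => omega
  | succ f ih =>
    cases h : pvDistinct s with
    | true =>
      have : m = s := by
        by_contra hne
        have hlt : s < m := by omega
        have := hmin s (le_refl s) hlt (by simp)
        simp [h] at this
      simp [pvLoopB, h, this]
    | false =>
      have hmne : m ≠ s := fun he => by rw [he] at hv; simp [h] at hv
      have hstep : s + 14 ≤ m := by omega
      simp only [pvLoopB, h, Bool.false_eq_true, if_false]
      exact ih (s + 14) hstep (by omega) (by push_cast at hF ⊢; omega)
        (fun k hk1 hk2 hk3 => hmin k (by omega) hk2 (by omega))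

-- 2147503869 is featured (odd multiple of 7 with all-distinct digits) and exceeds 2^31
theorem pvBigValid : pvIsValid 2147503869 = true := by decide

theorem next_featured_spec' (floor : Int) (hd : Dom_next_featured floor) :
    next_featured floor = next_featured_alt floor := by
  have hfl : -2147483648 ≤ floor ∧ floor ≤ 2147483648 := by
    simpa [Dom_next_featured, pvDomInt] using hd
  -- existence of a featured number above floor
  have hex : ∃ k : Nat, pvIsValid (floor + 1 + (k : Int)) = true := by
    refine ⟨(2147503869 - floor - 1).toNat, ?_⟩
    have : floor + 1 + ((2147503869 - floor - 1).toNat : Int) = 2147503869 := by omega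
    rw [this]; exact pvBigValid
  classical
  let k0 := Nat.find hex
  have hk0 : pvIsValid (floor + 1 + (k0 : Int)) = true := Nat.find_spec hex
  set m : Int := floor + 1 + (k0 : Int) with hm
  have hmltN : m ≤ 2147503869 := by
    have hle : k0 ≤ (2147503869 - floor - 1).toNat := by
      apply Nat.find_min' hex
      have : floor + 1 + ((2147503869 - floor - 1).toNat : Int) = 2147503869 := by omega
      rw [this]; exact pvBigValid
    omega
  have hflm : floor < m := by omega
  have hmin : ∀ k, floor < k → k < m → pvIsValid k = false := by
    intro k hk1 hk2
    have hj : ∃ j : Nat, k = floor + 1 + (j : Int) ∧ j < k0 := by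
      refine ⟨(k - floor - 1).toNat, by omega, by omega⟩
    obtain ⟨j, hjk, hjlt⟩ := hj
    have := Nat.find_min hex hjlt
    rw [hjk]; simpa using this
  -- A's port returns m
  have hA : next_featured floor = m := by
    apply pvLoopA_spec _ _ _ hk0 hflm _ hmin
    push_cast; omega
  -- B's start value
  set s : Int := floor + 1 + PySem.Int.mod (7 - (floor + 1)) 14 with hs
  have hmod := PySem.Int.mod_eq_emod_of_pos (a := 7 - (floor + 1)) (b := 14) (by norm_num)
  have hs7 : s % 14 = 7 := by rw [hs, hmod]; omega
  have hm7 : m % 14 = 7 := ((pvIsValid_iff m).mp hk0).1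
  have hmd : pvDistinct m = true := ((pvIsValid_iff m).mp hk0).2
  have hsle : s ≤ m := by rw [hs, hmod]; omega
  have hB : next_featured_alt floor = m := by
    unfold next_featured_alt
    rw [← hs]
    apply pvLoopB_spec _ _ _ hmd hsle (by omega) (by push_cast; rw [hs, hmod]; omega)
    intro k hk1 hk2 hk3
    have hk7 : k % 14 = 7 := by omega
    by_contra hkd
    have hkd' : pvDistinct k = true := by
      cases hkk : pvDistinct k with
      | true => rfl
      | false => exact absurd hkk hkd
    have : pvIsValid k = true := (pvIsValid_iff k).mpr ⟨hk7, hkd'⟩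
    have hfk : floor < k := by rw [hs] at hk1; omega
    have := hmin k hfk hk2
    simp_all
  rw [hA, hB]

-- ===== VERDICT (by name: the statement is the Claim_ definition above) =====
theorem next_featured_spec : Claim_equal_next_featured := by
  intro floor hd
  exact next_featured_spec' floor hd
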